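-- pv_equiv track=rewrite | github.com/bintiw/synthesis-707 | utils.py | remove_MCC_redundant
-- ===== SOURCE A (Python) =====
-- def remove_MCC_redundant(duplicate):
--     final = []
--     for i in duplicate:
--         flag = 0
--         for j in duplicate:
--             if (i.issubset(j) and i!=j):
--                 flag =1
--         if flag==0:
--             final.append(i)
--     return final
-- ===== SOURCE B (Python) =====
-- def remove_MCC_redundant(duplicate):
--     n = len(duplicate)
--     sets = [set(s) for s in duplicate]
--     order = sorted(range(n), key=lambda k: -len(sets[k]))
--     survivors = []
--     kept = set()
--     for k in order:
--         s = sets[k]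
--         if not any(s < t for t in survivors):
--             kept.add(k)
--             survivors.append(s)
--     return [duplicate[k] for k in range(n) if k in kept]
-- ===== Notes on version B (the rewrite author's own statement) =====
-- stated objective: alternative
-- what changed: Instead of testing every set against every other set with a flag loop, B sorts indices by descending set cardinality and sweeps once, keeping a list of surviving maximal sets and marking a set redundant iff it is a proper subset of an already-kept survivor, then restores input order.
import Mathlib
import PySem

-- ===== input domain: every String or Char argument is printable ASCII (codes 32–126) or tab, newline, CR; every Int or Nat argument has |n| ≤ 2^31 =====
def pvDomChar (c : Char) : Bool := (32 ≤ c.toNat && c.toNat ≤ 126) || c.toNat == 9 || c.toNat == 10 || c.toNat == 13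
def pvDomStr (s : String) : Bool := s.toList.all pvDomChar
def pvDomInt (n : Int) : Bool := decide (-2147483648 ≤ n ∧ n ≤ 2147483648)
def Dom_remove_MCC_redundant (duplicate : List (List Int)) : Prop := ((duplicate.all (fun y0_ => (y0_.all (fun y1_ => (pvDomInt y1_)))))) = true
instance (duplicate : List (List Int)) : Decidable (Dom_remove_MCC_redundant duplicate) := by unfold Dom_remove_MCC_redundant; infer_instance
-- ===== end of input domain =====

-- B removes proper-subset sets by a single size-descending sweep over a survivor list instead of A's all-pairs flag loop; equivalence of return values is proved (inner lists are Python sets: compared by membership).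

-- ===== PORT A =====
-- i.issubset(j) on Python sets
def bSub (a b : List Int) : Bool := a.all (fun x => b.contains x)

def remove_MCC_redundant (duplicate : List (List Int)) : List (List Int) :=
  duplicate.foldl (fun final i =>
    let flag := duplicate.foldl (fun flag j =>
      if bSub i j && !(bSub i j && bSub j i) then (1 : Int) else flag) 0
    if flag == 0 then final ++ [i] else final) []

-- ===== PORT B =====
-- s < t on Python sets (proper subset)
def bProper (a b : List Int) : Bool := bSub a b && !(bSub b a)

-- loop body of B's sweep: state = (kept index set, survivor sets)
def bStep (sets : List (List Int)) (st : List Nat × List (List Int)) (k : Nat) :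
    List Nat × List (List Int) :=
  let s := sets.getD k []
  if st.2.any (fun t => bProper s t) then st
  else (PySem.Set.add st.1 k, st.2 ++ [s])

def remove_MCC_redundant_alt (duplicate : List (List Int)) : List (List Int) :=
  let n := duplicate.length
  let sets := duplicate.map PySem.List.dedup
  let order := PySem.List.sorted (List.range n)
      (fun k => -(((sets.getD k []).length : Int))) false
  let res := order.foldl (bStep sets) ([], [])
  ((List.range n).filter (fun k => res.1.contains k)).map (fun k => duplicate.getD k [])

-- ===== PRECONDITION & SPEC =====
def Spec_remove_MCC_redundant (duplicate : List (List Int)) (out : List (List Int)) : Prop := out = remove_MCC_redundant_alt duplicate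
instance (duplicate : List (List Int)) (out : List (List Int)) : Decidable (Spec_remove_MCC_redundant duplicate out) := by unfold Spec_remove_MCC_redundant; infer_instance

-- ===== CLAIM (what is proved, stated in full; the proofs are below) =====
def Claim_equal_remove_MCC_redundant : Prop := ∀ (duplicate : List (List Int)), Dom_remove_MCC_redundant duplicate → Spec_remove_MCC_redundant duplicate (remove_MCC_redundant duplicate)

-- ===== LEMMAS AND PROOFS =====

theorem bSub_iff (a b : List Int) : bSub a b = true ↔ ∀ x ∈ a, x ∈ b := by
  simp [bSub]


theorem bSub_dedup_left (a b : List Int) : bSub (PySem.List.dedup a) b = bSub a b := by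
  rw [Bool.eq_iff_iff]; simp [bSub_iff]


theorem bSub_dedup_right (a b : List Int) : bSub a (PySem.List.dedup b) = bSub a b := by
  rw [Bool.eq_iff_iff]; simp [bSub_iff]


theorem condA_eq (i j : List Int) :
    (bSub i j && !(bSub i j && bSub j i)) = bProper i j := by
  cases h1 : bSub i j <;> cases h2 : bSub j i <;> simp [bProper, h1, h2]


theorem flagA (d : List (List Int)) (i : List Int) (a : Int) :
    d.foldl (fun flag j => if bSub i j && !(bSub i j && bSub j i) then (1 : Int) else flag) a
      = if d.any (fun j => bProper i j) then 1 else a := by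
  induction d generalizing a with
  | nil => simp
  | cons j d ih =>
    simp only [condA_eq] at ih ⊢
    simp only [List.foldl_cons, List.any_cons]
    by_cases h : bProper i j = true
    · rw [if_pos h, ih]
      simp [h]
    · simp only [Bool.not_eq_true] at h
      rw [if_neg (by simp [h]), ih]
      simp [h]

theorem bSub_trans {a b c : List Int} (h1 : bSub a b = true) (h2 : bSub b c = true) :
    bSub a c = true := by
  rw [bSub_iff] at *; exact fun x hx => h2 x (h1 x hx)


theorem bProper_length_lt {a b : List Int} (ha : a.Nodup) (hb : b.Nodup)
    (h : bProper a b = true) : a.length < b.length := by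
  simp only [bProper, Bool.and_eq_true, Bool.not_eq_true'] at h
  obtain ⟨hs, hns⟩ := h
  rw [bSub_iff] at hs
  have hsub : a.toFinset ⊆ b.toFinset := by
    intro x hx; rw [List.mem_toFinset] at *; exact hs x hx
  have hca : a.toFinset.card = a.length := List.toFinset_card_of_nodup ha
  have hcb : b.toFinset.card = b.length := List.toFinset_card_of_nodup hb
  have hle : a.toFinset.card ≤ b.toFinset.card := Finset.card_le_card hsub
  rcases lt_or_eq_of_le hle with h' | h'
  · omega
  · exfalso
    have := Finset.eq_of_subset_of_card_le hsub (le_of_eq h'.symm)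
    have hba : bSub b a = true := by
      rw [bSub_iff]; intro x hx
      have hxb : x ∈ b.toFinset := List.mem_toFinset.2 hx
      rw [← ‹a.toFinset = b.toFinset›] at hxb
      exact List.mem_toFinset.1 hxb
    simp [hba] at hns

theorem bStep_pos {sets : List (List Int)} {st : List Nat × List (List Int)} {k : Nat}
    (hc : st.2.any (fun t => bProper (sets.getD k []) t) = true) : bStep sets st k = st := by
  unfold bStep; rw [if_pos hc]


theorem bStep_neg {sets : List (List Int)} {st : List Nat × List (List Int)} {k : Nat}
    (hc : st.2.any (fun t => bProper (sets.getD k []) t) = false) :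
    bStep sets st k = (PySem.Set.add st.1 k, st.2 ++ [sets.getD k []]) := by
  unfold bStep; rw [if_neg (by rw [hc]; exact Bool.false_ne_true)]


theorem kept_mono (sets : List (List Int)) (l : List Nat) (st : List Nat × List (List Int))
    (k : Nat) (h : k ∈ st.1) : k ∈ (l.foldl (bStep sets) st).1 := by
  induction l generalizing st with
  | nil => exact h
  | cons x l ih =>
    refine ih _ ?_
    by_cases hc : (st.2.any (fun t => bProper (sets.getD x []) t)) = true
    · rw [bStep_pos hc]; exact h
    · rw [bStep_neg (Bool.not_eq_true _ ▸ hc)]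
      exact (PySem.Set.mem_add _ _ _).2 (Or.inl h)


theorem surv_mono (sets : List (List Int)) (l : List Nat) (st : List Nat × List (List Int))
    (t : List Int) (h : t ∈ st.2) : t ∈ (l.foldl (bStep sets) st).2 := by
  induction l generalizing st with
  | nil => exact h
  | cons x l ih =>
    refine ih _ ?_
    by_cases hc : (st.2.any (fun u => bProper (sets.getD x []) u)) = true
    · rw [bStep_pos hc]; exact h
    · rw [bStep_neg (Bool.not_eq_true _ ▸ hc)]
      exact List.mem_append_left _ h


theorem kept_src (sets : List (List Int)) (l : List Nat) (st : List Nat × List (List Int))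
    (k : Nat) (h : k ∈ (l.foldl (bStep sets) st).1) : k ∈ st.1 ∨ k ∈ l := by
  induction l generalizing st with
  | nil => exact Or.inl h
  | cons x l ih =>
    rcases ih _ h with h' | h'
    · by_cases hc : (st.2.any (fun t => bProper (sets.getD x []) t)) = true
      · rw [bStep_pos hc] at h'
        exact Or.inl h'
      · rw [bStep_neg (Bool.not_eq_true _ ▸ hc)] at h'
        rcases (PySem.Set.mem_add _ _ _).1 h' with h'' | h''
        · exact Or.inl h''
        · exact Or.inr (by simp [h''])
    · exact Or.inr (List.mem_cons_of_mem _ h')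


theorem surv_src (sets : List (List Int)) (l : List Nat) (st : List Nat × List (List Int))
    (t : List Int) (h : t ∈ (l.foldl (bStep sets) st).2) :
    t ∈ st.2 ∨ ∃ m ∈ l, t = sets.getD m [] := by
  induction l generalizing st with
  | nil => exact Or.inl h
  | cons x l ih =>
    rcases ih _ h with h' | h'
    · by_cases hc : (st.2.any (fun u => bProper (sets.getD x []) u)) = true
      · rw [bStep_pos hc] at h'
        exact Or.inl h'
      · rw [bStep_neg (Bool.not_eq_true _ ▸ hc)] at h'
        rcases List.mem_append.1 h' with h'' | h''
        · exact Or.inl h''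
        · exact Or.inr ⟨x, by simp, by simpa using h''⟩
    · obtain ⟨m, hm, he⟩ := h'
      exact Or.inr ⟨m, List.mem_cons_of_mem _ hm, he⟩

theorem bProper_sub {a b : List Int} (h : bProper a b = true) : bSub a b = true := by
  simp only [bProper, Bool.and_eq_true] at h; exact h.1


theorem bProper_nsub {a b : List Int} (h : bProper a b = true) : bSub b a = false := by
  simp only [bProper, Bool.and_eq_true, Bool.not_eq_true'] at h; exact h.2


theorem if_one_zero_eq (c : Bool) : ((if c = true then (1:Int) else 0) == 0) = !c := by
  cases c <;> simp


theorem A_char (d : List (List Int)) :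
    remove_MCC_redundant d = d.filter (fun i => !(d.any (fun j => bProper i j))) := by
  unfold remove_MCC_redundant
  simp only [flagA, if_one_zero_eq]
  rw [PySem.List.foldl_append_if_eq_filter]
  simp

theorem cond_to_red (sets : List (List Int)) (j : Nat) (l1 : List Nat)
    (hl1 : ∀ m ∈ l1, m < sets.length)
    (hc : ((l1.foldl (bStep sets) ([], [])).2.any
        (fun t => bProper (sets.getD j []) t)) = true) :
    (List.range sets.length).any
        (fun j' => bProper (sets.getD j []) (sets.getD j' [])) = true := by
  obtain ⟨t, ht, hbp⟩ := List.any_eq_true.1 hc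
  rcases surv_src sets l1 _ t ht with h | ⟨m, hm, he⟩
  · simp at h
  · exact List.any_eq_true.2 ⟨m, List.mem_range.2 (hl1 m hm), he ▸ hbp⟩


theorem kept_iff (sets : List (List Int)) (hnd : ∀ t ∈ sets, t.Nodup) (k : Nat)
    (hk : k < sets.length) :
    (k ∈ ((PySem.List.sorted (List.range sets.length)
        (fun j => -(((sets.getD j []).length : Int))) false).foldl (bStep sets) ([], [])).1
      ↔ ¬ ((List.range sets.length).any
            (fun j => bProper (sets.getD k []) (sets.getD j [])) = true)) := by
  set n := sets.length with hn
  set key : Nat → Int := fun j => -(((sets.getD j []).length : Int)) with hkey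
  set order := PySem.List.sorted (List.range n) key false with horder
  have hSmem : ∀ j, j < n → sets.getD j [] ∈ sets := by
    intro j hj; rw [List.getD_eq_getElem sets [] hj]; exact List.getElem_mem _
  have hSnd : ∀ j, j < n → (sets.getD j []).Nodup := fun j hj => hnd _ (hSmem j hj)
  have hmemo : ∀ j, j ∈ order ↔ j < n := by
    intro j
    rw [(PySem.List.sorted_perm (List.range n) key false).mem_iff, List.mem_range]
  have hndo : order.Nodup := (PySem.List.sorted_perm _ _ _).nodup_iff.2 (List.nodup_range)
  have hpw : order.Pairwise (fun a b => key a ≤ key b) := PySem.List.sorted_pairwise _ _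
  obtain ⟨l1, l2, hsplit⟩ := List.append_of_mem ((hmemo k).2 hk)
  have hl1n : ∀ m ∈ l1, m < n := fun m hm =>
    (hmemo m).1 (hsplit ▸ List.mem_append_left _ hm)
  have hknotin : k ∉ l1 ∧ k ∉ l2 := by
    rw [hsplit] at hndo
    simp [List.nodup_append] at hndo
    exact ⟨fun h => (hndo.2.2 k h).1 rfl, hndo.2.1.1⟩
  have hfold : order.foldl (bStep sets) ([], []) =
      l2.foldl (bStep sets) (bStep sets (l1.foldl (bStep sets) ([], [])) k) := by
    rw [hsplit, List.foldl_append, List.foldl_cons]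
  set st1 := l1.foldl (bStep sets) (([], []) : List Nat × List (List Int)) with hst1
  by_cases hc : st1.2.any (fun t => bProper (sets.getD k []) t) = true
  · -- redundant: proper superset already among survivors
    have hred := cond_to_red sets k l1 hl1n hc
    have hnk : k ∉ (order.foldl (bStep sets) ([], [])).1 := by
      rw [hfold, bStep_pos hc]
      intro h
      rcases kept_src sets l2 _ k h with h' | h'
      · rcases kept_src sets l1 _ k h' with h'' | h''
        · simp at h''
        · exact hknotin.1 h''
      · exact hknotin.2 h'
    exact iff_of_false hnk (not_not_intro hred)
  · simp only [Bool.not_eq_true] at hc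
    have hkin : k ∈ (order.foldl (bStep sets) ([], [])).1 := by
      rw [hfold]
      exact kept_mono sets l2 _ k (by rw [bStep_neg hc]; exact (PySem.Set.mem_add _ _ _).2 (Or.inr rfl))
    have hnred : (List.range n).any (fun j => bProper (sets.getD k []) (sets.getD j [])) = false := by
      by_contra hred
      simp only [Bool.not_eq_false] at hred
      obtain ⟨j0, hj0r, hbp0⟩ := List.any_eq_true.1 hred
      have hj0 : j0 < n := List.mem_range.1 hj0r
      set filtered := (List.range n).filter (fun j => bProper (sets.getD k []) (sets.getD j [])) with hfil
      have hfne : filtered ≠ [] := by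
        intro h
        have : j0 ∈ filtered := List.mem_filter.2 ⟨hj0r, hbp0⟩
        rw [h] at this; simp at this
      have hargne : filtered.argmax (fun j => (sets.getD j []).length) ≠ none :=
        fun h => hfne (List.argmax_eq_none.1 h)
      obtain ⟨m, hargeq⟩ := Option.ne_none_iff_exists'.1 hargne
      have hargm : m ∈ filtered.argmax (fun j => (sets.getD j []).length) :=
        Option.mem_def.2 hargeq
      have hmf := List.argmax_mem hargm
      have hmn : m < n := List.mem_range.1 (List.mem_filter.1 hmf).1
      have hbpm : bProper (sets.getD k []) (sets.getD m []) = true := (List.mem_filter.1 hmf).2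
      -- m has no proper superset at all
      have hnredm : (List.range n).any (fun j => bProper (sets.getD m []) (sets.getD j [])) = false := by
        by_contra hrm
        simp only [Bool.not_eq_false] at hrm
        obtain ⟨j', hj'r, hbp'⟩ := List.any_eq_true.1 hrm
        have hsub1 : bSub (sets.getD k []) (sets.getD m []) = true := bProper_sub hbpm
        have hsub2 : bSub (sets.getD m []) (sets.getD j' []) = true := bProper_sub hbp'
        have hkj' : bProper (sets.getD k []) (sets.getD j' []) = true := by
          have hns : bSub (sets.getD j' []) (sets.getD k []) = false := by
            by_contra hx
            simp only [Bool.not_eq_false] at hx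
            have hcontra := bSub_trans hx hsub1
            rw [bProper_nsub hbp'] at hcontra
            exact Bool.false_ne_true hcontra
          simp only [bProper, Bool.and_eq_true, Bool.not_eq_true']
          exact ⟨bSub_trans hsub1 hsub2, hns⟩
        have hj'f : j' ∈ filtered := List.mem_filter.2 ⟨hj'r, hkj'⟩
        have hle := List.le_of_mem_argmax hj'f hargm
        have hlt := bProper_length_lt (hSnd m hmn) (hSnd j' (List.mem_range.1 hj'r)) hbp'
        omega
      -- m is strictly bigger than k, so it comes before k in the order
      have hmlt : (sets.getD k []).length < (sets.getD m []).length :=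
        bProper_length_lt (hSnd k hk) (hSnd m hmn) hbpm
      have hml1 : m ∈ l1 := by
        have hmo : m ∈ order := (hmemo m).2 hmn
        rw [hsplit] at hmo
        rcases List.mem_append.1 hmo with h | h
        · exact h
        · rcases List.mem_cons.1 h with h | h
          · exfalso; rw [h] at hmlt; omega
          · exfalso
            rw [hsplit] at hpw
            have := ((List.pairwise_cons.1 (List.pairwise_append.1 hpw).2.1).1) m h
            have h2 : -(((sets.getD k []).length : Int)) ≤ -(((sets.getD m []).length : Int)) := this
            omega
      -- so sets[m] is a survivor when k is processed
      obtain ⟨p, q, hpl1⟩ := List.append_of_mem hml1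
      have hst1' : st1 = q.foldl (bStep sets) (bStep sets (p.foldl (bStep sets) ([], [])) m) := by
        rw [hst1, hpl1, List.foldl_append, List.foldl_cons]
      have hpn : ∀ x ∈ p, x < n := fun x hx => hl1n x (hpl1 ▸ List.mem_append_left _ hx)
      set stp := p.foldl (bStep sets) (([], []) : List Nat × List (List Int)) with hstp
      by_cases hcm : stp.2.any (fun t => bProper (sets.getD m []) t) = true
      · have := cond_to_red sets m p hpn hcm
        rw [this] at hnredm; exact absurd hnredm (by simp)
      · simp only [Bool.not_eq_true] at hcm
        have hsm : sets.getD m [] ∈ st1.2 := by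
          rw [hst1']
          exact surv_mono sets q _ _ (by rw [bStep_neg hcm]; exact List.mem_append_right _ (by simp))
        have : st1.2.any (fun t => bProper (sets.getD k []) t) = true :=
          List.any_eq_true.2 ⟨_, hsm, hbpm⟩
        rw [this] at hc; exact absurd hc (by simp)
    exact iff_of_true hkin (by rw [hnred]; simp)

theorem bProper_dedup (a b : List Int) :
    bProper (PySem.List.dedup a) (PySem.List.dedup b) = bProper a b := by
  unfold bProper; rw [bSub_dedup_left, bSub_dedup_right, bSub_dedup_left, bSub_dedup_right]

theorem B_char (d : List (List Int)) :
    remove_MCC_redundant_alt d =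
      ((List.range d.length).filter (fun k =>
        ((PySem.List.sorted (List.range d.length)
            (fun j => -((((d.map PySem.List.dedup).getD j []).length : Int))) false).foldl
          (bStep (d.map PySem.List.dedup)) ([], [])).1.contains k)).map
        (fun k => d.getD k []) := rfl

theorem getD_map_dedup (d : List (List Int)) (j : Nat) (hj : j < d.length) :
    (d.map PySem.List.dedup).getD j [] = PySem.List.dedup (d.getD j []) := by
  rw [List.getD_eq_getElem _ _ (by simpa using hj), List.getD_eq_getElem _ _ hj, List.getElem_map]

theorem red_idx_eq (d : List (List Int)) (k : Nat) (hk : k < d.length) :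
    ((List.range d.length).any
        (fun j => bProper ((d.map PySem.List.dedup).getD k []) ((d.map PySem.List.dedup).getD j [])))
      = d.any (fun j => bProper (d.getD k []) j) := by
  rw [Bool.eq_iff_iff, List.any_eq_true, List.any_eq_true]
  constructor
  · rintro ⟨j, hjr, hbp⟩
    have hj := List.mem_range.1 hjr
    rw [getD_map_dedup d k hk, getD_map_dedup d j hj, bProper_dedup] at hbp
    exact ⟨d.getD j [], by rw [List.getD_eq_getElem _ _ hj]; exact List.getElem_mem _, hbp⟩
  · rintro ⟨x, hx, hbp⟩
    obtain ⟨j, hj, hje⟩ := List.mem_iff_getElem.1 hx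
    refine ⟨j, List.mem_range.2 hj, ?_⟩
    rw [getD_map_dedup d k hk, getD_map_dedup d j hj, bProper_dedup,
      List.getD_eq_getElem _ _ hj, hje]
    exact hbp

theorem filter_range_map (xs : List (List Int)) (q : List Int → Bool) :
    (((List.range xs.length).filter (fun k => q (xs.getD k []))).map (fun k => xs.getD k []))
      = xs.filter q := by
  induction xs with
  | nil => simp
  | cons x xs ih =>
    have hq : (fun k => q ((x :: xs).getD k [])) ∘ Nat.succ = fun k => q (xs.getD k []) := by
      funext k; simp
    have hg : (fun k => (x :: xs).getD k []) ∘ Nat.succ = fun k => xs.getD k [] := by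
      funext k; simp
    rw [List.length_cons, List.range_succ_eq_map, List.filter_cons]
    simp only [List.getD_cons_zero]
    rw [List.filter_map, hq]
    by_cases h : q x
    · rw [if_pos h, List.map_cons, List.map_map, hg, ih]
      simp only [List.getD_cons_zero]
      rw [List.filter_cons_of_pos h]
    · rw [if_neg (by simp [h]), List.map_map, hg, ih]
      rw [List.filter_cons_of_neg (by simp [h])]

-- ===== VERDICT (by name: the statement is the Claim_ definition above) =====
theorem remove_MCC_redundant_spec : Claim_equal_remove_MCC_redundant := by
  intro d _
  unfold Spec_remove_MCC_redundant
  rw [A_char, B_char]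
  have hnd : ∀ t ∈ d.map PySem.List.dedup, t.Nodup := by
    intro t ht
    obtain ⟨s, _, rfl⟩ := List.mem_map.1 ht
    exact PySem.List.nodup_dedup s
  have hlen : (d.map PySem.List.dedup).length = d.length := List.length_map _
  have hcong : ∀ k ∈ List.range d.length,
      (((PySem.List.sorted (List.range d.length)
          (fun j => -((((d.map PySem.List.dedup).getD j []).length : Int))) false).foldl
        (bStep (d.map PySem.List.dedup)) ([], [])).1.contains k)
      = (!(d.any (fun j => bProper (d.getD k []) j))) := by
    intro k hkr
    have hk := List.mem_range.1 hkr
    rw [Bool.eq_iff_iff]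
    simp only [List.contains_iff_mem, Bool.not_eq_true']
    rw [← hlen] at hk ⊢
    rw [kept_iff (d.map PySem.List.dedup) hnd k hk]
    rw [hlen] at hk
    rw [hlen, red_idx_eq d k hk]
    simp
  rw [List.filter_congr hcong]
  exact (filter_range_map d (fun i => !(d.any (fun j => bProper i j)))).symm
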